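-- pv_equiv track=rewrite | github.com/niccolozanotti/python-language | lectures/lecture3.py | get_vowels
-- ===== SOURCE A (Python) =====
-- def remove_vowel(V, v):
--     # remove vowel 'v' from string 'S'
--     for i in range(len(V)):
--         if V[i] == v:
--             return V[:i] + V[i+1:]
--
-- def get_vowels(S):
--     # returns tuple of vowels in string, counted once and in order
--     # S is a lower cased string
--     vowels = 'aeiou'
--     vowels_found = ()
--     for s in S:
--         if s in vowels:
--             vowels = remove_vowel(vowels,s)
--             vowels_found = vowels_found + (s,)
--     return vowels_found
-- ===== SOURCE B (Python) =====
-- def get_vowels(S):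
--     # index-then-ordered-pass: record each vowel's first position, then emit
--     # the vowels that occurred, ordered by first occurrence
--     first = {}
--     for i, c in enumerate(S):
--         if c in 'aeiou' and c not in first:
--             first[c] = i
--     return tuple(sorted(first, key=lambda c: first[c]))
-- ===== Notes on version B (the rewrite author's own statement) =====
-- stated objective: alternative
-- what changed: B makes one pass over S building a first-occurrence index dict (instead of repeatedly searching and rebuilding a shrinking vowel pool string) and then returns the found vowels sorted by recorded first position.
import Mathlib
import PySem

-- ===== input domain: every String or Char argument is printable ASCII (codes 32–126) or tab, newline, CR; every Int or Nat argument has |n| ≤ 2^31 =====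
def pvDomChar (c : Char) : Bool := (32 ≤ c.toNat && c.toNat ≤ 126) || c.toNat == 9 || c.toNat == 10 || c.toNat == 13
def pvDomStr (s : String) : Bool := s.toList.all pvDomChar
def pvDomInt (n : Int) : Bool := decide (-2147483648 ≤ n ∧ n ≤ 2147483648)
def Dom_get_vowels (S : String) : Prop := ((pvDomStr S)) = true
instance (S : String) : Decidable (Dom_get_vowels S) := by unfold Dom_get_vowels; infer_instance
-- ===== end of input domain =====

-- B replaces A's shrinking-pool scan by a one-pass first-occurrence index dict followed by a
-- sort of the found vowels by recorded first position (alternative decomposition, same cost).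


-- ===== PORT A =====
-- for i in range(len(V)): if V[i] == v: return V[:i] + V[i+1:]   (falls off the end → None)
def remove_vowel_loop (V : List Char) (v : Char) (i : Nat) : Option (List Char) :=
  if h : i < V.length then
    if V[i] = v then
      some (PySem.List.slice V none (some (i : Int)) ++ PySem.List.slice V (some ((i : Int) + 1)) none)
    else remove_vowel_loop V v (i + 1)
  else none
termination_by V.length - i

def remove_vowel (V : List Char) (v : Char) : Option (List Char) := remove_vowel_loop V v 0

def get_vowels (S : String) : List String :=
  (S.toList.foldl
    (fun st s =>
      if PySem.Chars.isIn [s] st.1 then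
        -- remove_vowel is `some …` here since s is in the pool; Python never sees the None case
        ((remove_vowel st.1 s).getD st.1, st.2 ++ [String.ofList [s]])
      else st)
    ("aeiou".toList, ([] : List String))).2

-- ===== PORT B =====
def get_vowels_alt (S : String) : List String :=
  let first : PySem.Dict String Int :=
    (PySem.List.enumerate S.toList).foldl
      (fun d p =>
        if PySem.Chars.isIn [p.2] "aeiou".toList && !(d.contains (String.ofList [p.2])) then
          d.insert (String.ofList [p.2]) p.1
        else d)
      PySem.Dict.empty
  PySem.List.sorted first.keys (fun c => first.getD c 0) false

-- ===== PRECONDITION & SPEC =====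
def Spec_get_vowels (S : String) (out : List String) : Prop := out = get_vowels_alt S
instance (S : String) (out : List String) : Decidable (Spec_get_vowels S out) := by unfold Spec_get_vowels; infer_instance

-- ===== CLAIM (what is proved, stated in full; the proofs are below) =====
def Claim_equal_get_vowels : Prop := ∀ (S : String), Dom_get_vowels S → Spec_get_vowels S (get_vowels S)

-- ===== LEMMAS AND PROOFS =====


-- proof-only abbreviations and lemmas
theorem rv_shift (x : Char) (xs : List Char) (v : Char) (i : Nat) :
    remove_vowel_loop (x :: xs) v (i + 1) = (remove_vowel_loop xs v i).map (x :: ·) := by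
  fun_induction remove_vowel_loop xs v i with
  | case1 i h heq =>
    rw [remove_vowel_loop, dif_pos (by simpa using Nat.succ_lt_succ h)]
    simp only [List.getElem_cons_succ, heq, if_pos, Option.map_some]
    have e1 : ((i : Int) + 1) = ((i + 1 : Nat) : Int) := by push_cast; ring
    have e2 : (((i + 1 : Nat) : Int) + 1) = ((i + 2 : Nat) : Int) := by push_cast; ring
    rw [e2, PySem.List.slice_to_natCast, PySem.List.slice_from_natCast, e1,
      PySem.List.slice_to_natCast, PySem.List.slice_from_natCast]
    simp
  | case2 i h hne ih =>
    rw [remove_vowel_loop, dif_pos (by simpa using Nat.succ_lt_succ h)]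
    simp only [List.getElem_cons_succ]
    rw [if_neg hne]
    exact ih
  | case3 i h =>
    rw [remove_vowel_loop, remove_vowel_loop]
    simp [h]
theorem rv_cons (x : Char) (xs : List Char) (v : Char) :
    remove_vowel (x :: xs) v = if x = v then some xs else (remove_vowel xs v).map (x :: ·) := by
  rw [remove_vowel, remove_vowel_loop, dif_pos (by simp)]
  simp only [List.getElem_cons_zero]
  by_cases hx : x = v
  · rw [if_pos hx, if_pos hx]
    rw [show ((0 : Nat) : Int) + 1 = ((1 : Nat) : Int) by norm_num, PySem.List.slice_to_natCast,
      PySem.List.slice_from_natCast]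
    simp
  · rw [if_neg hx, if_neg hx, show (0 : Nat) + 1 = 0 + 1 from rfl, rv_shift]
    rfl

theorem rv_mem (v : Char) (V : List Char) (h : v ∈ V) : remove_vowel V v = some (V.erase v) := by
  induction V with
  | nil => simp at h
  | cons x xs ih =>
    rw [rv_cons, List.erase_cons]
    by_cases hx : x = v
    · simp [hx]
    · rcases List.mem_cons.mp h with h' | h'
      · exact absurd h'.symm hx
      · simp [hx, beq_eq_false_iff_ne.mpr hx, ih h']

def stepA (st : List Char × List String) (s : Char) : List Char × List String :=
  if PySem.Chars.isIn [s] st.1 then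
    ((remove_vowel st.1 s).getD st.1, st.2 ++ [String.ofList [s]])
  else st

def stepB (d : PySem.Dict String Int) (p : Int × Char) : PySem.Dict String Int :=
  if PySem.Chars.isIn [p.2] "aeiou".toList && !(d.contains (String.ofList [p.2])) then
    d.insert (String.ofList [p.2]) p.1
  else d

theorem isIn_single_true {c : Char} {l : List Char} (h : c ∈ l) : PySem.Chars.isIn [c] l = true := by
  rw [PySem.Chars.isIn_iff_infix]; exact (List.singleton_infix_iff c l).mpr h

theorem isIn_single_false {c : Char} {l : List Char} (h : c ∉ l) : PySem.Chars.isIn [c] l = false := by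
  rw [PySem.Chars.isIn_eq_false_iff]; exact fun hi => h ((List.singleton_infix_iff c l).mp hi)

theorem main_inv (l : List Char) :
    ∀ (pool : List Char) (found : List String) (d : PySem.Dict String Int) (i : Int),
    (∀ c : Char, c ∈ pool ↔ (c ∈ "aeiou".toList ∧ d.contains (String.ofList [c]) = false)) →
    pool.Nodup →
    found = d.keys →
    d.keys.Nodup →
    d.items.Pairwise (fun p q => p.2 < q.2) →
    (∀ p ∈ d.items, p.2 < i) →
    (l.foldl stepA (pool, found)).2 = ((PySem.List.enumerate l i).foldl stepB d).keys
    ∧ ((PySem.List.enumerate l i).foldl stepB d).keys.Nodup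
    ∧ ((PySem.List.enumerate l i).foldl stepB d).items.Pairwise (fun p q => p.2 < q.2)
    ∧ (∀ p ∈ ((PySem.List.enumerate l i).foldl stepB d).items, p.2 < i + l.length) := by
  induction l with
  | nil =>
    intro pool found d i hpool hnd hfound hknd hpw hlt
    simp only [PySem.List.enumerate_nil, List.foldl_nil, List.length_nil]
    exact ⟨hfound, hknd, hpw, by simpa using hlt⟩
  | cons c l' ih =>
    intro pool found d i hpool hnd hfound hknd hpw hlt
    rw [PySem.List.enumerate_cons]
    simp only [List.foldl_cons]
    by_cases hc : c ∈ pool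
    · have hmem := (hpool c).mp hc
      have hA : stepA (pool, found) c =
          (pool.erase c, found ++ [String.ofList [c]]) := by
        simp only [stepA, isIn_single_true hc, if_pos, rv_mem c pool hc, Option.getD_some]
      have hB : stepB d (i, c) = d.insert (String.ofList [c]) i := by
        simp only [stepB, isIn_single_true hmem.1, hmem.2, Bool.not_false, Bool.and_self, if_pos]
      rw [hA, hB]
      have hkeys' := PySem.Dict.keys_insert_of_not_contains d i hmem.2
      have hitems' := PySem.Dict.items_insert_of_not_contains d i hmem.2
      have res := ih (pool.erase c) (found ++ [String.ofList [c]]) (d.insert (String.ofList [c]) i) (i + 1)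
        (by
          intro c'
          rw [List.Nodup.mem_erase_iff hnd, PySem.Dict.contains_insert, hpool c']
          constructor
          · rintro ⟨hne, hmm, hcon⟩
            refine ⟨hmm, ?_⟩
            simp [hcon, hne, String.ofList_inj]
          · rintro ⟨hmm, hcon⟩
            simp only [Bool.or_eq_false_iff, beq_eq_false_iff_ne] at hcon
            exact ⟨fun he => hcon.1 (by rw [he]), hmm, hcon.2⟩)
        (hnd.erase c)
        (by rw [hfound, hkeys'])
        (PySem.Dict.nodup_keys_insert d _ i hknd)
        (by
          rw [hitems', List.pairwise_append]
          exact ⟨hpw, by simp, by intro a ha b hb; simp only [List.mem_singleton] at hb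
                                  subst hb; exact hlt a ha⟩)
        (by
          intro p hp
          rw [hitems'] at hp
          rcases List.mem_append.mp hp with h' | h'
          · exact lt_trans (hlt p h') (by omega)
          · simp only [List.mem_singleton] at h'; subst h'; omega)
      refine ⟨res.1, res.2.1, res.2.2.1, ?_⟩
      intro p hp
      have := res.2.2.2 p hp
      simp only [List.length_cons]
      push_cast
      omega
    · have hA : stepA (pool, found) c = (pool, found) := by
        simp only [stepA, isIn_single_false hc, Bool.false_eq_true, if_neg, not_false_eq_true]
      have hB : stepB d (i, c) = d := by
        by_cases hmm : c ∈ "aeiou".toList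
        · have : d.contains (String.ofList [c]) = true := by
            by_contra h'
            exact hc ((hpool c).mpr ⟨hmm, by simpa using h'⟩)
          simp [stepB, this]
        · have h0 : PySem.Chars.isIn [c] ['a','e','i','o','u'] = false :=
            isIn_single_false (by simpa using hmm)
          simp [stepB, h0]
      rw [hA, hB]
      have res := ih pool found d (i + 1) hpool hnd hfound hknd hpw
        (fun p hp => lt_trans (hlt p hp) (by omega))
      refine ⟨res.1, res.2.1, res.2.2.1, ?_⟩
      intro p hp
      have := res.2.2.2 p hp
      simp only [List.length_cons]
      push_cast
      omega

-- a dict whose stored values increase along the items list sorts its keys to themselves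
theorem sorted_keys_id (d : PySem.Dict String Int)
    (hnd : d.keys.Nodup) (hp : d.items.Pairwise (fun p q => p.2 < q.2)) :
    PySem.List.sorted d.keys (fun c => d.getD c 0) false = d.keys := by
  apply PySem.List.sorted_eq_self_of_pairwise
  show (d.items.map (·.1)).Pairwise _
  rw [List.pairwise_map]
  refine List.Pairwise.imp_of_mem ?_ hp
  intro p q hpm hqm hlt
  have h1 : d.getD p.1 0 = p.2 := PySem.Dict.getD_of_mem_items d (by simpa using hpm) hnd 0
  have h2 : d.getD q.1 0 = q.2 := PySem.Dict.getD_of_mem_items d (by simpa using hqm) hnd 0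
  simp only [h1, h2]
  exact le_of_lt hlt

-- ===== VERDICT (by name: the statement is the Claim_ definition above) =====
theorem get_vowels_spec : Claim_equal_get_vowels := by
  intro S _
  obtain ⟨hA, hnd, hpw, -⟩ := main_inv S.toList "aeiou".toList [] PySem.Dict.empty 0
    (by intro c; simp [PySem.Dict.contains_empty]) (by decide) rfl (by decide) (by decide)
    (by decide)
  show get_vowels S = get_vowels_alt S
  unfold stepA at hA
  unfold stepB at hA hnd hpw
  simp only [get_vowels, get_vowels_alt]
  rw [hA, sorted_keys_id _ hnd hpw]
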